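-- pv_equiv track=rewrite | github.com/kazido/coconut-capitalist | utils/pagination.py | _split_remaining_words
-- ===== SOURCE A (Python) =====
-- import typing as t
--
-- def _split_remaining_words(line: str, max_chars: int) -> t.Tuple[str, t.Optional[str]]:
--     """
--     Internal: split a line into two strings -- reduced_words and remaining_words.
--
--     reduced_words: the remaining words in `line`, after attempting to remove all words that
--         exceed `max_chars` (rounding down to the nearest word boundary).
--
--     remaining_words: the words in `line` which exceed `max_chars`. This value is None if
--         no words could be split from `line`.
--
--     If there are any remaining_words, an ellipses is appended to reduced_words and a
--     continuation header is inserted before remaining_words to visually communicate the line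
--     continuation.
--
--     Return a tuple in the format (reduced_words, remaining_words).
--     """
--     reduced_words = []
--     remaining_words = []
--
--     # "(Continued)" is used on a line by itself to indicate the continuation of last page
--     continuation_header = "(Continued)\n-----------\n"
--     reduced_char_count = 0
--     is_full = False
--
--     for word in line.split(" "):
--         if not is_full:
--             if len(word) + reduced_char_count <= max_chars:
--                 reduced_words.append(word)
--                 reduced_char_count += len(word) + 1
--             else:
--                 # If reduced_words is empty, we were unable to split the words across pages
--                 if not reduced_words:
--                     return line, None
--                 is_full = True
--                 remaining_words.append(word)
--         else:
--             remaining_words.append(word)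
--
--     return (
--         " ".join(reduced_words) + "..." if remaining_words else "",
--         continuation_header + " ".join(remaining_words) if remaining_words else None,
--     )
-- ===== SOURCE B (Python) =====
-- import typing as t
--
-- def _split_remaining_words(line: str, max_chars: int) -> t.Tuple[str, t.Optional[str]]:
--     words = line.split(" ")
--     sums = []
--     total = 0
--     for w in words:
--         total += len(w) + 1
--         sums.append(total)
--     i = sum(1 for s in sums if s <= max_chars + 1)
--     if i == len(words):
--         return "", None
--     if i == 0:
--         return line, None
--     return (" ".join(words[:i]) + "...",
--             "(Continued)\n-----------\n" + " ".join(words[i:]))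
-- ===== Notes on version B (the rewrite author's own statement) =====
-- stated objective: simpler
-- what changed: B replaces A's stateful loop with two accumulator lists and an is_full flag by computing prefix sums of word lengths, counting how many fit to get the split index, and slicing the word list there.
import Mathlib
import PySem

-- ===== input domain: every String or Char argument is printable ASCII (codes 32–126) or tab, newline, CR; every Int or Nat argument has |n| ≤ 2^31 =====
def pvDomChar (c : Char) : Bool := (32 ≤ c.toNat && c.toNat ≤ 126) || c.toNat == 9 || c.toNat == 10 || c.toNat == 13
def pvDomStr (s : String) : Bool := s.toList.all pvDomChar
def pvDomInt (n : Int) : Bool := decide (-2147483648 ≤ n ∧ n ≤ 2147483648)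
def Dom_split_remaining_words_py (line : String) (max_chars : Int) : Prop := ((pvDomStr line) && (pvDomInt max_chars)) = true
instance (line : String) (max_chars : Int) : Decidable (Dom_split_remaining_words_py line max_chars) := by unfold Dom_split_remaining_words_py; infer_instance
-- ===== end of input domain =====

-- B replaces A's stateful two-list/flag accumulation by a prefix-sum count that yields the
-- split index, then slices; objective: simpler (no speed claim).

-- ===== PORT A =====
-- the final tuple built after A's loop (same conditional expressions)
def pvFinalA (red rem : List (List Char)) : String × Option String :=
  (if rem ≠ [] then String.ofList (PySem.Chars.join [' '] red ++ "...".toList) else "",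
   if rem ≠ [] then some (String.ofList ("(Continued)\n-----------\n".toList ++ PySem.Chars.join [' '] rem)) else none)

-- A's for-loop over the words, state (reduced_words, remaining_words, reduced_char_count, is_full),
-- with the early `return line, None`
def pvGoA (line : String) (max_chars : Int) :
    List (List Char) → List (List Char) → List (List Char) → Int → Bool → String × Option String
  | [], red, rem, _, _ => pvFinalA red rem
  | w :: ws, red, rem, cnt, full =>
    if full = false then
      if (w.length : Int) + cnt ≤ max_chars then
        pvGoA line max_chars ws (red ++ [w]) rem (cnt + w.length + 1) false
      else if red = [] then (line, none)
      else pvGoA line max_chars ws red (rem ++ [w]) cnt true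
    else pvGoA line max_chars ws red (rem ++ [w]) cnt full

def split_remaining_words_py (line : String) (max_chars : Int) : String × Option String :=
  pvGoA line max_chars (PySem.Chars.splitOn line.toList [' ']) [] [] 0 false

-- ===== PORT B =====
-- running prefix sums `total += len(w) + 1` of Source B
def pvSumsB : List (List Char) → Int → List Int
  | [], _ => []
  | w :: ws, t => (t + w.length + 1) :: pvSumsB ws (t + w.length + 1)

def split_remaining_words_py_alt (line : String) (max_chars : Int) : String × Option String :=
  let words := PySem.Chars.splitOn line.toList [' ']
  let sums := pvSumsB words 0
  let i := sums.countP (fun s => s ≤ max_chars + 1)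
  if i = words.length then ("", none)
  else if i = 0 then (line, none)
  else (String.ofList (PySem.Chars.join [' '] (words.take i) ++ "...".toList),
        some (String.ofList ("(Continued)\n-----------\n".toList ++ PySem.Chars.join [' '] (words.drop i))))

-- ===== PRECONDITION & SPEC =====
def Spec_split_remaining_words_py (line : String) (max_chars : Int) (out : String × Option String) : Prop := out = split_remaining_words_py_alt line max_chars
instance (line : String) (max_chars : Int) (out : String × Option String) : Decidable (Spec_split_remaining_words_py line max_chars out) := by unfold Spec_split_remaining_words_py; infer_instance

-- ===== CLAIM (what is proved, stated in full; the proofs are below) =====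
def Claim_equal_split_remaining_words_py : Prop := ∀ (line : String) (max_chars : Int), Dom_split_remaining_words_py line max_chars → Spec_split_remaining_words_py line max_chars (split_remaining_words_py line max_chars)

-- ===== LEMMAS AND PROOFS =====

-- split index: length of the longest prefix of words that fits
def pvSplitIdx (max_chars : Int) : List (List Char) → Int → Nat
  | [], _ => 0
  | w :: ws, cnt =>
    if (w.length : Int) + cnt ≤ max_chars then pvSplitIdx max_chars ws (cnt + w.length + 1) + 1 else 0

theorem pvSplitIdx_le (mc : Int) : ∀ (ws : List (List Char)) (cnt : Int),
    pvSplitIdx mc ws cnt ≤ ws.length := by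
  intro ws
  induction ws with
  | nil => intro cnt; simp [pvSplitIdx]
  | cons w ws ih =>
    intro cnt
    simp only [pvSplitIdx, List.length_cons]
    split_ifs with h
    · exact Nat.succ_le_succ (ih _)
    · exact Nat.zero_le _

theorem pvSumsB_mem_gt : ∀ (ws : List (List Char)) (t : Int) (s : Int),
    s ∈ pvSumsB ws t → t < s := by
  intro ws
  induction ws with
  | nil => intro t s h; simp [pvSumsB] at h
  | cons w ws ih =>
    intro t s h
    simp only [pvSumsB, List.mem_cons] at h
    rcases h with h | h
    · have : (0 : Int) ≤ (w.length : Int) := Int.natCast_nonneg _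
      omega
    · have := ih _ _ h
      have : (0 : Int) ≤ (w.length : Int) := Int.natCast_nonneg _
      omega

theorem pvCount_eq_splitIdx (mc : Int) : ∀ (ws : List (List Char)) (t : Int),
    (pvSumsB ws t).countP (fun s => s ≤ mc + 1) = pvSplitIdx mc ws t := by
  intro ws
  induction ws with
  | nil => intro t; simp [pvSumsB, pvSplitIdx]
  | cons w ws ih =>
    intro t
    simp only [pvSumsB, pvSplitIdx, List.countP_cons]
    by_cases h : (w.length : Int) + t ≤ mc
    · have h' : (t + (w.length : Int) + 1 ≤ mc + 1) := by omega
      simp only [h', if_pos, decide_eq_true_eq]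
      rw [ih]
      simp [h]
    · have h' : ¬ (t + (w.length : Int) + 1 ≤ mc + 1) := by omega
      have hz : (pvSumsB ws (t + (w.length : Int) + 1)).countP (fun s => s ≤ mc + 1) = 0 := by
        rw [List.countP_eq_zero]
        intro s hs
        have := pvSumsB_mem_gt ws _ s hs
        simp only [decide_eq_true_eq]
        omega
      simp [h, h', hz]

theorem pvGoA_full (line : String) (mc : Int) :
    ∀ (ws red rem : List (List Char)) (cnt : Int),
    pvGoA line mc ws red rem cnt true = pvFinalA red (rem ++ ws) := by
  intro ws
  induction ws with
  | nil => intro red rem cnt; simp [pvGoA]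
  | cons w ws ih =>
    intro red rem cnt
    simp only [pvGoA, Bool.true_eq_false, reduceIte]
    rw [ih]
    simp

theorem pvGoA_run (line : String) (mc : Int) :
    ∀ (ws red : List (List Char)) (cnt : Int), red ≠ [] →
    pvGoA line mc ws red [] cnt false =
      pvFinalA (red ++ ws.take (pvSplitIdx mc ws cnt)) (ws.drop (pvSplitIdx mc ws cnt)) := by
  intro ws
  induction ws with
  | nil => intro red cnt _; simp [pvGoA, pvSplitIdx]
  | cons w ws ih =>
    intro red cnt hred
    simp only [pvGoA, pvSplitIdx, reduceIte]
    by_cases h : (w.length : Int) + cnt ≤ mc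
    · rw [if_pos h, ih (red ++ [w]) _ (by simp), if_pos h]
      simp [List.take_succ_cons, List.drop_succ_cons, List.append_assoc]
    · rw [if_neg h, if_neg hred, pvGoA_full, if_neg h]
      simp

-- ===== VERDICT (by name: the statement is the Claim_ definition above) =====
theorem split_remaining_words_py_spec : Claim_equal_split_remaining_words_py := by
  intro line mc _
  unfold Spec_split_remaining_words_py split_remaining_words_py split_remaining_words_py_alt
  set words := PySem.Chars.splitOn line.toList [' '] with hwords
  simp only [pvCount_eq_splitIdx]
  cases words with
  | nil => simp [pvGoA, pvFinalA, pvSplitIdx]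
  | cons w ws =>
    simp only [pvGoA, pvSplitIdx, reduceIte, List.nil_append, List.length_cons, add_zero, zero_add]
    by_cases h : (w.length : Int) ≤ mc
    · rw [if_pos h, pvGoA_run line mc ws [w] _ (by simp)]
      simp only [if_pos h]
      set k := pvSplitIdx mc ws ((w.length : Int) + 1) with hk
      by_cases hend : k + 1 = ws.length + 1
      · have hkk : k = ws.length := by omega
        simp [hkk, pvFinalA]
      · have hklt : k < ws.length := by
          have := pvSplitIdx_le mc ws ((w.length : Int) + 1)
          omega
        have hdrop : ws.drop k ≠ [] := by
          intro hcontra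
          have := List.drop_eq_nil_iff.mp hcontra
          omega
        have hne : ¬ k = ws.length := by omega
        simp [pvFinalA, hdrop, hne, List.take_succ_cons, List.drop_succ_cons]
    · simp [h]
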